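-- pv_equiv track=rewrite | github.com/Eatkin/codewars-solutions | Python/Steganography_Part_1-6_kyu.py | conceal
-- ===== SOURCE A (Python) =====
-- def conceal(msg: str, pixels: list[list[int]]):
--     for i, char in enumerate(msg):
--         val = ord(char)
--         for j in range(8):
--             bit = (val >> 7 - j) & 1
--             try:
--                 pixels[i * 3 + j // 3][j % 3] = pixels[i * 3 + j // 3][j % 3] >> 1 << 1 | bit
--             except:
--                 return None
--     return pixels
-- ===== SOURCE B (Python) =====
-- def conceal(msg: str, pixels: list[list[int]]):
--     # Stream decomposition: consume pixels three rows per character via an iterator,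
--     # rebuilding each touched row functionally (no index arithmetic, no try/except).
--     # Does not mutate pixels; equivalence with A is about the return value.
--     it = iter(pixels)
--     out = []
--     for ch in msg:
--         val = ord(ch)
--         for j0, width in ((0, 3), (3, 3), (6, 2)):
--             row = next(it, None)
--             if row is None or len(row) < width:
--                 return None
--             out.append([x >> 1 << 1 | (val >> 7 - j0 - c) & 1
--                         for c, x in enumerate(row[:width])] + row[width:])
--     return out + list(it)
-- ===== Notes on version B (the rewrite author's own statement) =====
-- stated objective: alternative
-- what changed: A writes bits one at a time into pixels by absolute index arithmetic (row i*3+j//3, col j%3) under try/except; B instead streams the pixel rows through an iterator, consuming exactly three rows per character and rebuilding each touched row functionally (new list, no indexing, no exception handling), then appends the untouched tail. B does not mutate pixels; the equivalence is about the return value.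
import Mathlib
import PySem

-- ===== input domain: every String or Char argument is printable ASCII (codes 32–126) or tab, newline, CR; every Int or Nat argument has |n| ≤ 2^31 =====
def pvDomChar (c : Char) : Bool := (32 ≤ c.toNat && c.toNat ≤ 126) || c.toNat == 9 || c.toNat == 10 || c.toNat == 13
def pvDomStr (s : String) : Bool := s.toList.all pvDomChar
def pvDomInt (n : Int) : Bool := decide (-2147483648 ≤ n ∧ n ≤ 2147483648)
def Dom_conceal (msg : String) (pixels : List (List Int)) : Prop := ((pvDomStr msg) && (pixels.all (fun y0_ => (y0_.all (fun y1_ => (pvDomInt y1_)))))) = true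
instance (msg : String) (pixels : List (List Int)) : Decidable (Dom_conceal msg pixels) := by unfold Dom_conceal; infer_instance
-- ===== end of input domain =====

-- B replaces A's absolute-index bit-by-bit writes (try/except) by streaming the pixel rows
-- through the list, consuming three rows per character and rebuilding each touched row
-- functionally (alternative decomposition, same cost). A mutates `pixels` in place (partially
-- even when it returns None); B does not mutate at all: the equivalence proved here is about
-- the RETURN value only.

-- ===== PORT A =====
-- the assignment `pixels[r][c] = pixels[r][c] >> 1 << 1 | bit` under try/except:
-- read row, read cell, write back; `none` = IndexError at that assignment (exact: pyGet?/pySet?).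
def lsbWrite (px : List (List Int)) (r c : Nat) (bit : Int) : Option (List (List Int)) :=
  (PySem.List.pyGet? px (r : Int)).bind fun row =>
  (PySem.List.pyGet? row (c : Int)).bind fun v =>
  (PySem.List.pySet? row (c : Int) (PySem.Int.bor ((v >>> 1) <<< 1) bit)).bind fun row' =>
  PySem.List.pySet? px (r : Int) row'

-- inner loop `for j in range(8)` with early `return None`
def concealInner (i : Nat) (val : Int) : List Nat → List (List Int) → Option (List (List Int))
  | [], px => some px
  | j :: js, px =>
    let bit := PySem.Int.band (val >>> (7 - j)) 1
    match lsbWrite px (i * 3 + j / 3) (j % 3) bit with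
    | none => none
    | some px' => concealInner i val js px'

-- outer loop `for i, char in enumerate(msg)`
def concealOuter : Nat → List Char → List (List Int) → Option (List (List Int))
  | _, [], px => some px
  | i, c :: cs, px =>
    match concealInner i (c.toNat : Int) (List.range 8) px with
    | none => none
    | some px' => concealOuter (i + 1) cs px'

def conceal (msg : String) (pixels : List (List Int)) : Option (List (List Int)) :=
  concealOuter 0 msg.toList pixels

-- ===== PORT B =====
-- rebuilt row: [x >> 1 << 1 | (val >> 7 - j0 - c) & 1 for c, x in enumerate(row[:width])] + row[width:]
-- (the enumerate index c is ≥ 0, so `.toNat` is exact)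
def encRow (val : Int) (j0 width : Nat) (row : List Int) : List Int :=
  ((PySem.List.enumerate (row.take width) 0).map fun (p : Int × Int) =>
    PySem.Int.bor ((p.2 >>> 1) <<< 1) (PySem.Int.band (val >>> (7 - j0 - p.1.toNat)) 1))
  ++ row.drop width

-- inner loop `for j0, width in ((0,3),(3,3),(6,2))`: pull the next row off the stream,
-- fail if exhausted or too short, else append the rebuilt row to `out`
def altChar (val : Int) : List (Nat × Nat) → List (List Int) → List (List Int) →
    Option (List (List Int) × List (List Int))
  | [], out, rest => some (out, rest)
  | (j0, w) :: ps, out, rest =>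
    match rest with
    | [] => none
    | row :: rest' =>
      if row.length < w then none
      else altChar val ps (out ++ [encRow val j0 w row]) rest'

-- outer loop `for ch in msg`; at the end `out + list(it)`
def altGo : List Char → List (List Int) → List (List Int) → Option (List (List Int))
  | [], out, rest => some (out ++ rest)
  | c :: cs, out, rest =>
    match altChar (c.toNat : Int) [(0, 3), (3, 3), (6, 2)] out rest with
    | none => none
    | some (out', rest') => altGo cs out' rest'

def conceal_alt (msg : String) (pixels : List (List Int)) : Option (List (List Int)) :=
  altGo msg.toList [] pixels

-- ===== PRECONDITION & SPEC =====
def Spec_conceal (msg : String) (pixels : List (List Int)) (out : Option (List (List Int))) : Prop := out = conceal_alt msg pixels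
instance (msg : String) (pixels : List (List Int)) (out : Option (List (List Int))) : Decidable (Spec_conceal msg pixels out) := by unfold Spec_conceal; infer_instance

-- ===== CLAIM =====
def Claim_equal_conceal : Prop := ∀ (msg : String) (pixels : List (List Int)), Dom_conceal msg pixels → Spec_conceal msg pixels (conceal msg pixels)

-- ===== LEMMAS AND PROOFS =====

-- a write at row index k+1 skips the head row
lemma lsb_cons_succ (r : List Int) (px : List (List Int)) (k c : Nat) (bit : Int) :
    lsbWrite (r :: px) (k + 1) c bit = (lsbWrite px k c bit).map (r :: ·) := by
  unfold lsbWrite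
  have hget : PySem.List.pyGet? (r :: px) ((k + 1 : Nat) : Int) = PySem.List.pyGet? px (k : Int) := by
    push_cast
    exact PySem.List.pyGet?_cons_succ r px k
  rw [hget]
  cases hrow : PySem.List.pyGet? px (k : Int) with
  | none => rfl
  | some row =>
    simp only [Option.bind_some]
    cases hv : PySem.List.pyGet? row (c : Int) with
    | none => rfl
    | some v =>
      simp only [Option.bind_some]
      cases hset : PySem.List.pySet? row (c : Int) (PySem.Int.bor ((v >>> 1) <<< 1) bit) with
      | none => rfl
      | some row' =>
        simp only [Option.bind_some]
        by_cases hk : k < px.length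
        · rw [PySem.List.pySet?_natCast px k row' hk,
              PySem.List.pySet?_natCast (r :: px) (k + 1) row' (by simpa using Nat.succ_lt_succ hk)]
          simp [List.set]
        · have h1 : PySem.List.pySet? px (k : Int) row' = none := by
            rw [PySem.List.pySet?_eq_none_iff]
            intro h
            rcases h with ⟨_, h2⟩
            omega
          have h2 : PySem.List.pySet? (r :: px) ((k + 1 : Nat) : Int) row' = none := by
            rw [PySem.List.pySet?_eq_none_iff]
            intro h
            rcases h with ⟨_, h2⟩
            simp at h2
            omega
          rw [h1, h2]
          rfl

lemma lsb_one (r : List Int) (px : List (List Int)) (c : Nat) (bit : Int) :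
    lsbWrite (r :: px) 1 c bit = (lsbWrite px 0 c bit).map (r :: ·) := by
  have h := lsb_cons_succ r px 0 c bit
  norm_num at h
  exact h

lemma lsb_two (r : List Int) (px : List (List Int)) (c : Nat) (bit : Int) :
    lsbWrite (r :: px) 2 c bit = (lsbWrite px 1 c bit).map (r :: ·) := by
  have h := lsb_cons_succ r px 1 c bit
  norm_num at h
  exact h

-- a write into an empty pixel list is an IndexError
lemma lsb_nil (k c : Nat) (bit : Int) : lsbWrite [] k c bit = none := by
  unfold lsbWrite
  rw [PySem.List.pyGet?_natCast]
  rfl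

-- write to row 0 of the pixel list acts on the head row only
lemma lsb_zero (r : List Int) (px : List (List Int)) (c : Nat) (bit : Int) :
    lsbWrite (r :: px) 0 c bit =
      ((PySem.List.pyGet? r (c : Int)).bind fun v =>
        PySem.List.pySet? r (c : Int) (PySem.Int.bor ((v >>> 1) <<< 1) bit)).map (· :: px) := by
  unfold lsbWrite
  rw [show ((0 : Nat) : Int) = 0 from rfl, PySem.List.pyGet?_zero_cons]
  simp only [Option.bind_some]
  cases hv : PySem.List.pyGet? r (c : Int) with
  | none => rfl
  | some v =>
    simp only [Option.bind_some]
    cases hset : PySem.List.pySet? r (c : Int) (PySem.Int.bor ((v >>> 1) <<< 1) bit) with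
    | none => rfl
    | some row' =>
      simp only [Option.bind_some, Option.map_some]
      simpa using PySem.List.pySet?_natCast (r :: px) 0 row' (by simp)

-- single-cell write on a row
lemma cellWrite_eq (r : List Int) (c : Nat) (bit : Int) :
    ((PySem.List.pyGet? r (c : Int)).bind fun v =>
        PySem.List.pySet? r (c : Int) (PySem.Int.bor ((v >>> 1) <<< 1) bit)) =
      if h : c < r.length then some (r.set c (PySem.Int.bor ((r[c] >>> 1) <<< 1) bit)) else none := by
  by_cases h : c < r.length
  · rw [PySem.List.pyGet?_natCast, List.getElem?_eq_getElem h]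
    simp only [Option.bind_some]
    rw [PySem.List.pySet?_natCast r c _ h]
    simp [h]
  · rw [PySem.List.pyGet?_natCast, List.getElem?_eq_none (by omega)]
    simp [h]

lemma lsb_head_oob (r : List Int) (px : List (List Int)) (c : Nat) (bit : Int)
    (h : ¬ c < r.length) : lsbWrite (r :: px) 0 c bit = none := by
  rw [lsb_zero, cellWrite_eq]
  simp [h]

-- the three single-column writes on the head row, by column
lemma w0 (x bit : Int) (t : List Int) (px : List (List Int)) :
    lsbWrite ((x :: t) :: px) 0 0 bit =
      some ((PySem.Int.bor ((x >>> 1) <<< 1) bit :: t) :: px) := by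
  rw [lsb_zero, cellWrite_eq]
  simp

lemma w1 (x y bit : Int) (t : List Int) (px : List (List Int)) :
    lsbWrite ((x :: y :: t) :: px) 0 1 bit =
      some ((x :: PySem.Int.bor ((y >>> 1) <<< 1) bit :: t) :: px) := by
  rw [lsb_zero, cellWrite_eq]
  simp

lemma w2 (x y z bit : Int) (t : List Int) (px : List (List Int)) :
    lsbWrite ((x :: y :: z :: t) :: px) 0 2 bit =
      some ((x :: y :: PySem.Int.bor ((z >>> 1) <<< 1) bit :: t) :: px) := by
  rw [lsb_zero, cellWrite_eq]
  simp

lemma range8 : List.range 8 = [0, 1, 2, 3, 4, 5, 6, 7] := by decide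

-- shapes of sufficiently long rows
lemma row3_shape (r : List Int) (h : 3 ≤ r.length) : ∃ x y z t, r = x :: y :: z :: t := by
  rcases r with _ | ⟨x, _ | ⟨y, _ | ⟨z, t⟩⟩⟩ <;> simp at h
  exact ⟨x, y, z, t, rfl⟩

lemma row2_shape (r : List Int) (h : 2 ≤ r.length) : ∃ x y t, r = x :: y :: t := by
  rcases r with _ | ⟨x, _ | ⟨y, t⟩⟩ <;> simp at h
  exact ⟨x, y, t, rfl⟩

-- A's eight writes for one char when everything is in range
lemma inner_ok (val : Int) (r0 r1 r2 : List Int) (rest : List (List Int))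
    (h0 : 3 ≤ r0.length) (h1 : 3 ≤ r1.length) (h2 : 2 ≤ r2.length) :
    concealInner 0 val (List.range 8) (r0 :: r1 :: r2 :: rest) =
      some (encRow val 0 3 r0 :: encRow val 3 3 r1 :: encRow val 6 2 r2 :: rest) := by
  obtain ⟨x0, y0, z0, t0, rfl⟩ := row3_shape r0 h0
  obtain ⟨x1, y1, z1, t1, rfl⟩ := row3_shape r1 h1
  obtain ⟨x2, y2, t2, rfl⟩ := row2_shape r2 h2
  rw [range8]
  simp [concealInner, w0, w1, w2, lsb_one, lsb_two, encRow,
        PySem.List.enumerate_cons, PySem.List.enumerate_nil]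

-- the five ways one char's writes hit an IndexError
lemma inner_nil (val : Int) : concealInner 0 val (List.range 8) [] = none := by
  rw [range8]
  simp [concealInner, lsb_nil]

lemma inner_r0_short (val : Int) (r0 : List Int) (px : List (List Int))
    (h : r0.length < 3) : concealInner 0 val (List.range 8) (r0 :: px) = none := by
  rw [range8]
  rcases r0 with _ | ⟨x, _ | ⟨y, _ | ⟨z, t⟩⟩⟩
  · simp [concealInner, lsb_head_oob]
  · simp [concealInner, w0, lsb_head_oob]
  · simp [concealInner, w0, w1, lsb_head_oob]
  · exfalso
    simp only [List.length_cons] at h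
    omega

lemma inner_one (val : Int) (r0 : List Int) (h0 : 3 ≤ r0.length) :
    concealInner 0 val (List.range 8) [r0] = none := by
  obtain ⟨x0, y0, z0, t0, rfl⟩ := row3_shape r0 h0
  rw [range8]
  simp [concealInner, w0, w1, w2, lsb_one, lsb_nil]

lemma inner_r1_short (val : Int) (r0 r1 : List Int) (px : List (List Int))
    (h0 : 3 ≤ r0.length) (h : r1.length < 3) :
    concealInner 0 val (List.range 8) (r0 :: r1 :: px) = none := by
  obtain ⟨x0, y0, z0, t0, rfl⟩ := row3_shape r0 h0
  rw [range8]
  rcases r1 with _ | ⟨x, _ | ⟨y, _ | ⟨z, t⟩⟩⟩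
  · simp [concealInner, w0, w1, w2, lsb_one, lsb_head_oob]
  · simp [concealInner, w0, w1, w2, lsb_one, lsb_head_oob]
  · simp [concealInner, w0, w1, w2, lsb_one, lsb_head_oob]
  · exfalso
    simp only [List.length_cons] at h
    omega

lemma inner_two (val : Int) (r0 r1 : List Int) (h0 : 3 ≤ r0.length) (h1 : 3 ≤ r1.length) :
    concealInner 0 val (List.range 8) [r0, r1] = none := by
  obtain ⟨x0, y0, z0, t0, rfl⟩ := row3_shape r0 h0
  obtain ⟨x1, y1, z1, t1, rfl⟩ := row3_shape r1 h1
  rw [range8]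
  simp [concealInner, w0, w1, w2, lsb_one, lsb_two, lsb_nil]

lemma inner_r2_short (val : Int) (r0 r1 r2 : List Int) (px : List (List Int))
    (h0 : 3 ≤ r0.length) (h1 : 3 ≤ r1.length) (h : r2.length < 2) :
    concealInner 0 val (List.range 8) (r0 :: r1 :: r2 :: px) = none := by
  obtain ⟨x0, y0, z0, t0, rfl⟩ := row3_shape r0 h0
  obtain ⟨x1, y1, z1, t1, rfl⟩ := row3_shape r1 h1
  rw [range8]
  rcases r2 with _ | ⟨x, _ | ⟨y, t⟩⟩
  · simp [concealInner, w0, w1, w2, lsb_one, lsb_two, lsb_head_oob]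
  · simp [concealInner, w0, w1, w2, lsb_one, lsb_two, lsb_head_oob]
  · exfalso
    simp only [List.length_cons] at h
    omega

-- inner shift: for char index i+1 every row index a char touches is 3 more than for i
lemma inner_shift (i : Nat) (val : Int) (js : List Nat) (a b c : List Int)
    (px : List (List Int)) :
    concealInner (i + 1) val js (a :: b :: c :: px)
      = (concealInner i val js px).map (fun q => a :: b :: c :: q) := by
  induction js generalizing px with
  | nil => rfl
  | cons j js ih =>
    rw [concealInner, concealInner]
    have hidx : (i + 1) * 3 + j / 3 = (i * 3 + j / 3) + 1 + 1 + 1 := by omega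
    rw [hidx, lsb_cons_succ, lsb_cons_succ, lsb_cons_succ]
    cases lsbWrite px (i * 3 + j / 3) (j % 3) (PySem.Int.band (val >>> (7 - j)) 1) with
    | none => rfl
    | some px' => exact ih px'

-- outer shift
lemma outer_shift (cs : List Char) : ∀ (i : Nat) (a b c : List Int) (px : List (List Int)),
    concealOuter (i + 1) cs (a :: b :: c :: px)
      = (concealOuter i cs px).map (fun q => a :: b :: c :: q) := by
  induction cs with
  | nil => intro i a b c px; rfl
  | cons ch cs ih =>
    intro i a b c px
    rw [concealOuter, concealOuter, inner_shift]
    cases concealInner i (ch.toNat : Int) (List.range 8) px with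
    | none => rfl
    | some px' => exact ih (i + 1) a b c px'

-- main bridge: B's streaming pass equals A's indexed pass with the produced prefix factored out
lemma go_eq (cs : List Char) : ∀ (out rest : List (List Int)),
    altGo cs out rest = (concealOuter 0 cs rest).map (out ++ ·) := by
  induction cs with
  | nil => intro out rest; rfl
  | cons c cs ih =>
    intro out rest
    rw [altGo, concealOuter]
    rcases rest with _ | ⟨r0, _ | ⟨r1, _ | ⟨r2, rest⟩⟩⟩
    · rw [inner_nil]
      simp [altChar]
    · by_cases h0 : 3 ≤ r0.length
      · rw [inner_one _ _ h0]
        simp [altChar, show ¬ r0.length < 3 by omega]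
      · rw [inner_r0_short _ _ _ (by omega)]
        simp [altChar, show r0.length < 3 by omega]
    · by_cases h0 : 3 ≤ r0.length
      · by_cases h1 : 3 ≤ r1.length
        · rw [inner_two _ _ _ h0 h1]
          simp [altChar, show ¬ r0.length < 3 by omega, show ¬ r1.length < 3 by omega]
        · rw [inner_r1_short _ _ _ _ h0 (by omega)]
          simp [altChar, show ¬ r0.length < 3 by omega, show r1.length < 3 by omega]
      · rw [inner_r0_short _ _ _ (by omega)]
        simp [altChar, show r0.length < 3 by omega]
    · by_cases h0 : 3 ≤ r0.length
      · by_cases h1 : 3 ≤ r1.length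
        · by_cases h2 : 2 ≤ r2.length
          · rw [inner_ok _ _ _ _ _ h0 h1 h2]
            simp only [altChar, show ¬ r0.length < 3 by omega, show ¬ r1.length < 3 by omega,
                       show ¬ r2.length < 2 by omega, if_false]
            rw [outer_shift, ih]
            cases concealOuter 0 cs rest <;> simp
          · rw [inner_r2_short _ _ _ _ _ h0 h1 (by omega)]
            simp [altChar, show ¬ r0.length < 3 by omega, show ¬ r1.length < 3 by omega,
                  show r2.length < 2 by omega]
        · rw [inner_r1_short _ _ _ _ h0 (by omega)]
          simp [altChar, show ¬ r0.length < 3 by omega, show r1.length < 3 by omega]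
      · rw [inner_r0_short _ _ _ (by omega)]
        simp [altChar, show r0.length < 3 by omega]

-- ===== VERDICT =====
theorem conceal_spec : Claim_equal_conceal := by
  intro msg pixels _
  unfold Spec_conceal conceal conceal_alt
  rw [go_eq]
  cases concealOuter 0 msg.toList pixels <;> simp
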